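-- pv_equiv track=rewrite | github.com/FICTION-ZJU/Pastry | pastry/src/analysis/guard_analysis.py | find_minimum_period
-- ===== SOURCE A (Python) =====
-- def find_minimum_period(value_list):
--     T = len(value_list)
--     if T <= 1:
--         return T
--     for T_prime in range(1, T):
--         if T % T_prime == 0:
--             sub_period = value_list[:T_prime]
--             repeated = sub_period * (T // T_prime)
--             if repeated == value_list:
--                 return T_prime
--     return T
-- ===== SOURCE B (Python) =====
-- def find_minimum_period(value_list):
--     # Minimal period = smallest p >= 1 such that shifting every index by p (cyclically)
--     # leaves the list unchanged; such a p automatically divides the length, so no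
--     # divisor test or prefix tiling is needed.
--     T = len(value_list)
--     for p in range(1, T):
--         if all(value_list[i] == value_list[(i + p) % T] for i in range(T)):
--             return p
--     return T
-- ===== Notes on version B (the rewrite author's own statement) =====
-- stated objective: alternative
-- what changed: A scans the divisors of len(value_list) and tests each by tiling a prefix and comparing whole lists; B instead returns the smallest shift p>=1 for which every index satisfies value_list[i] == value_list[(i+p) % T] (a short-circuiting all()) - such a p automatically divides the length, so the divisibility test and prefix tiling disappear.
import Mathlib
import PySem

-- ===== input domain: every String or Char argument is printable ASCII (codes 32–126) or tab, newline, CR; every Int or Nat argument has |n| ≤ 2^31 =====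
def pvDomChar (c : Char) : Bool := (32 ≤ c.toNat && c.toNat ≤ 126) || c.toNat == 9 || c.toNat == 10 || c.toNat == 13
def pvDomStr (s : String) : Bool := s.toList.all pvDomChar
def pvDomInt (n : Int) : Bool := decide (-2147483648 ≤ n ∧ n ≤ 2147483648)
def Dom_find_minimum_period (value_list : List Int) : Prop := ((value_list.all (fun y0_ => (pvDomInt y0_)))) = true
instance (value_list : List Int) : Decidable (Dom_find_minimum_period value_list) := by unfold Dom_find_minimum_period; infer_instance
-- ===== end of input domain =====

-- B replaces A's scan of the divisors of T (tiling check per divisor) by a scan for the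
-- smallest cyclic shift fixing the list (a short-circuiting per-index check), which
-- automatically divides T; alternative algorithm, not claimed faster.

-- ===== PORT A =====
def pvALoop (value_list : List Int) (T : Int) : List Int → Int
  | [] => T
  | t :: rest =>
      if PySem.Int.mod T t == 0 then
        let sub_period := PySem.List.slice value_list none (some t)
        let repeated := PySem.List.pyRepeat sub_period (PySem.Int.floordiv T t)
        if repeated == value_list then t else pvALoop value_list T rest
      else pvALoop value_list T rest

def find_minimum_period (value_list : List Int) : Int :=
  let T : Int := value_list.length
  if T ≤ 1 then T
  else pvALoop value_list T (PySem.List.pyRange 1 T 1)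

-- ===== PORT B =====
def pvBLoop (value_list : List Int) : List Int → Int
  | [] => (value_list.length : Int)
  | p :: rest =>
      if (PySem.List.pyRange 0 (value_list.length : Int) 1).all
           (fun i => PySem.List.pyGet? value_list i ==
             PySem.List.pyGet? value_list (PySem.Int.mod (i + p) (value_list.length : Int)))
      then p else pvBLoop value_list rest

def find_minimum_period_alt (value_list : List Int) : Int :=
  pvBLoop value_list (PySem.List.pyRange 1 (value_list.length : Int) 1)

-- ===== PRECONDITION & SPEC =====
def Spec_find_minimum_period (value_list : List Int) (out : Int) : Prop := out = find_minimum_period_alt value_list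
instance (value_list : List Int) (out : Int) : Decidable (Spec_find_minimum_period value_list out) := by unfold Spec_find_minimum_period; infer_instance

-- ===== CLAIM (what is proved, stated in full; the proofs are below) =====
def Claim_equal_find_minimum_period : Prop := ∀ (value_list : List Int), Dom_find_minimum_period value_list → Spec_find_minimum_period value_list (find_minimum_period value_list)

-- ===== LEMMAS AND PROOFS =====

-- the Boolean tests the two loops apply to a candidate
def pvFA (l : List Int) (T : Int) (c : Int) : Bool :=
  (PySem.Int.mod T c == 0) &&
    (PySem.List.pyRepeat (PySem.List.slice l none (some c)) (PySem.Int.floordiv T c) == l)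

def pvFB (l : List Int) (c : Int) : Bool :=
  (PySem.List.pyRange 0 (l.length : Int) 1).all
    (fun i => PySem.List.pyGet? l i ==
      PySem.List.pyGet? l (PySem.Int.mod (i + c) (l.length : Int)))

lemma pvALoop_eq (l : List Int) (T : Int) (cs : List Int) :
    pvALoop l T cs = ((cs.find? (pvFA l T)).getD T) := by
  induction cs with
  | nil => rfl
  | cons c r ih =>
      by_cases h1 : (PySem.Int.mod T c == 0) = true
      · by_cases h2 : (PySem.List.pyRepeat (PySem.List.slice l none (some c)) (PySem.Int.floordiv T c) == l) = true
        · simp [pvALoop, pvFA, h1, h2, List.find?]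
        · simp [pvALoop, pvFA, h1, h2, List.find?, ih]
      · simp [pvALoop, pvFA, h1, List.find?, ih]

lemma pvBLoop_eq (l : List Int) (cs : List Int) :
    pvBLoop l cs = ((cs.find? (pvFB l)).getD (l.length : Int)) := by
  induction cs with
  | nil => rfl
  | cons c r ih =>
      by_cases h : ((PySem.List.pyRange 0 (l.length : Int) 1).all
          (fun i => PySem.List.pyGet? l i ==
            PySem.List.pyGet? l (PySem.Int.mod (i + c) (l.length : Int)))) = true
      · simp [pvBLoop, pvFB, h, List.find?]
      · simp [pvBLoop, pvFB, h, List.find?, ih]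

-- shift-invariance by p, expressed with getElem?
def pvP (l : List Int) (p : Nat) : Prop := ∀ i < l.length, l[(i + p) % l.length]? = l[i]?

lemma pvP_len (l : List Int) : pvP l l.length := by
  intro i hi
  rw [Nat.add_mod_right, Nat.mod_eq_of_lt hi]

lemma pvP_sub {l : List Int} {a b : Nat} (ha : pvP l a) (hb : pvP l b) (h : b ≤ a) :
    pvP l (a - b) := by
  intro i hi
  have hT : 0 < l.length := Nat.lt_of_le_of_lt (Nat.zero_le i) hi
  have hj : (i + (a - b)) % l.length < l.length := Nat.mod_lt _ hT
  have h1 := hb _ hj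
  have h2 : ((i + (a - b)) % l.length + b) % l.length = (i + a) % l.length := by
    rw [Nat.mod_add_mod]
    congr 1
    omega
  rw [h2] at h1
  exact h1.symm.trans (ha i hi)

lemma pvP_dvd {l : List Int} {p : Nat} (hp1 : 1 ≤ p) (hp : pvP l p)
    (hmin : ∀ q, 1 ≤ q → q < p → ¬ pvP l q) : ∀ a, pvP l a → p ∣ a := by
  intro a
  induction a using Nat.strong_induction_on with
  | _ a ih =>
    intro hpa
    by_cases h0 : a = 0
    · simp [h0]
    · by_cases hlt : a < p
      · exact absurd hpa (hmin a (by omega) hlt)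
      · have hsub : pvP l (a - p) := pvP_sub hpa hp (by omega)
        have hd := ih (a - p) (by omega) hsub
        have : a = (a - p) + p := by omega
        rw [this]
        exact Nat.dvd_add hd dvd_rfl

lemma pvTile_getElem (s : List Int) (m : Nat) :
    ∀ i, i < m * s.length → ((List.replicate m s).flatten)[i]? = s[i % s.length]? := by
  induction m with
  | zero => intro i hi; rw [Nat.zero_mul] at hi; omega
  | succ m ih =>
      intro i hi
      rw [Nat.succ_mul] at hi
      rw [List.replicate_succ, List.flatten_cons]
      by_cases h : i < s.length
      · rw [List.getElem?_append_left h, Nat.mod_eq_of_lt h]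
      · rw [List.getElem?_append_right (by omega), ih (i - s.length) (by omega)]
        rw [← Nat.mod_eq_sub_mod (by omega)]

lemma pvTile_length (s : List Int) (m : Nat) :
    ((List.replicate m s).flatten).length = m * s.length := by
  rw [List.length_flatten, List.map_replicate, List.sum_replicate, smul_eq_mul]

lemma pvP_mod {l : List Int} {p : Nat} (hP : pvP l p) (hp1 : 1 ≤ p) :
    ∀ i < l.length, l[i]? = l[i % p]? := by
  intro i
  induction i using Nat.strong_induction_on with
  | _ i ih =>
    intro hi
    by_cases h : i < p
    · rw [Nat.mod_eq_of_lt h]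
    · have h1 := hP (i - p) (by omega)
      have h2 : (i - p + p) % l.length = i := by
        rw [Nat.sub_add_cancel (by omega), Nat.mod_eq_of_lt hi]
      rw [h2] at h1
      rw [h1, ih (i - p) (by omega) (by omega), ← Nat.mod_eq_sub_mod (by omega)]

lemma pvTile_eq_iff (l : List Int) (p : Nat) (hp1 : 1 ≤ p) (hpd : p ∣ l.length)
    (hpT : p ≤ l.length) :
    ((List.replicate (l.length / p) (l.take p)).flatten = l) ↔ pvP l p := by
  have hs : (l.take p).length = p := by simp; omega
  have htl : ((List.replicate (l.length / p) (l.take p)).flatten).length = l.length := by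
    rw [pvTile_length, hs, Nat.div_mul_cancel hpd]
  constructor
  · intro h i hi
    have hT : 0 < l.length := by omega
    have e1 := pvTile_getElem (l.take p) (l.length / p) ((i + p) % l.length)
      (by rw [hs, Nat.div_mul_cancel hpd]; exact Nat.mod_lt _ hT)
    have e2 := pvTile_getElem (l.take p) (l.length / p) i
      (by rw [hs, Nat.div_mul_cancel hpd]; exact hi)
    rw [h] at e1 e2
    rw [e1, e2, hs]
    have : (i + p) % l.length % p = i % p := by
      rw [Nat.mod_mod_of_dvd _ hpd, Nat.add_mod_right]
    rw [this]
  · intro hP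
    apply List.ext_getElem?
    intro i
    by_cases hi : i < l.length
    · rw [pvTile_getElem (l.take p) (l.length / p) i (by rw [hs, Nat.div_mul_cancel hpd]; exact hi)]
      rw [hs, List.getElem?_take, if_pos (Nat.mod_lt _ (by omega))]
      exact ((pvP_mod hP hp1) i hi).symm
    · rw [List.getElem?_eq_none (show ((List.replicate (l.length / p) (l.take p)).flatten).length ≤ i by rw [htl]; omega),
        List.getElem?_eq_none (show l.length ≤ i by omega)]

lemma pvFind_eq (f g : Nat → Bool) :
    ∀ n, (∀ k < n, f k = true → g k = true) →
      (∀ k < n, g k = true → (∀ j < k, g j = false) → f k = true) →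
      (List.range n).find? f = (List.range n).find? g := by
  intro n
  induction n with
  | zero => intro _ _; simp
  | succ n ih =>
      intro h1 h2
      rw [List.range_succ, List.find?_append, List.find?_append,
        ih (fun k hk => h1 k (by omega)) (fun k hk => h2 k (by omega))]
      cases hg : (List.range n).find? g with
      | some v => simp
      | none =>
          simp only [Option.none_or]
          have hnog : ∀ j < n, g j = false := by
            intro j hj
            have := List.find?_eq_none.mp hg j (List.mem_range.mpr hj)
            simpa using this
          by_cases hfn : f n = true
          · have hgn := h1 n (by omega) hfn
            simp [List.find?, hfn, hgn]
          · have hgn : g n = false := by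
              by_contra hc
              have hgt : g n = true := by
                cases h : g n
                · exact absurd h hc
                · rfl
              exact hfn (h2 n (by omega) hgt hnog)
            simp [List.find?, hgn]
            simp at hfn
            simp [hfn]

lemma pvFA_iff (l : List Int) (k : Nat) :
    pvFA l (l.length : Int) ((1 : Int) + (k : Int)) = true ↔
      ((k + 1) ∣ l.length ∧ (List.replicate (l.length / (k + 1)) (l.take (k + 1))).flatten = l) := by
  have hc : (1 : Int) + (k : Int) = ((k + 1 : Nat) : Int) := by push_cast; ring
  rw [pvFA, hc, PySem.Int.mod_natCast, PySem.Int.floordiv_natCast,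
    PySem.List.slice_to_natCast]
  simp only [PySem.List.pyRepeat, Bool.and_eq_true, beq_iff_eq, Nat.cast_eq_zero,
    Int.toNat_natCast]
  rw [Nat.dvd_iff_mod_eq_zero]

lemma pvFB_iff (l : List Int) (k : Nat) :
    pvFB l ((1 : Int) + (k : Int)) = true ↔ pvP l (k + 1) := by
  rw [pvFB, PySem.List.pyRange_zero_nat, List.all_map, List.all_eq_true]
  constructor
  · intro h i hi
    have := h i (List.mem_range.mpr hi)
    simp only [Function.comp_apply, PySem.List.pyGet?_natCast] at this
    have hc : (i : Int) + ((1 : Int) + (k : Int)) = ((i + (k + 1) : Nat) : Int) := by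
      push_cast; ring
    rw [hc, PySem.Int.mod_natCast, PySem.List.pyGet?_natCast, beq_iff_eq] at this
    exact this.symm
  · intro hP i hi
    have hi' := List.mem_range.mp hi
    simp only [Function.comp_apply, PySem.List.pyGet?_natCast]
    have hc : (i : Int) + ((1 : Int) + (k : Int)) = ((i + (k + 1) : Nat) : Int) := by
      push_cast; ring
    rw [hc, PySem.Int.mod_natCast, PySem.List.pyGet?_natCast, beq_iff_eq]
    exact (hP i hi').symm

lemma pvMain (l : List Int) (h2 : 2 ≤ l.length) :
    (List.range (l.length - 1)).find? (fun k : Nat => pvFA l (l.length : Int) ((1 : Int) + (k : Int))) =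
      (List.range (l.length - 1)).find? (fun k : Nat => pvFB l ((1 : Int) + (k : Int))) := by
  apply pvFind_eq
  · intro k hk hfa
    rw [pvFA_iff] at hfa
    obtain ⟨hdvd, htile⟩ := hfa
    have hle : k + 1 ≤ l.length := Nat.le_of_dvd (by omega) hdvd
    rw [pvFB_iff]
    exact (pvTile_eq_iff l (k + 1) (by omega) hdvd hle).mp htile
  · intro k hk hfb hmin
    rw [pvFB_iff] at hfb
    have hle : k + 1 ≤ l.length := by omega
    have hP : pvP l (k + 1) := hfb
    have hminP : ∀ q, 1 ≤ q → q < k + 1 → ¬ pvP l q := by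
      intro q hq1 hqk hPq
      have hj := hmin (q - 1) (by omega)
      rw [← Bool.not_eq_true] at hj
      apply hj
      rw [pvFB_iff]
      have : q - 1 + 1 = q := by omega
      rw [this]
      exact hPq
    have hdvd : (k + 1) ∣ l.length := pvP_dvd (by omega) hP hminP l.length (pvP_len l)
    rw [pvFA_iff]
    exact ⟨hdvd, (pvTile_eq_iff l (k + 1) (by omega) hdvd hle).mpr hP⟩

-- ===== VERDICT (by name: the statement is the Claim_ definition above) =====
theorem find_minimum_period_spec : Claim_equal_find_minimum_period := by
  intro l _
  unfold Spec_find_minimum_period find_minimum_period find_minimum_period_alt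
  by_cases hT : l.length ≤ 1
  · have h1 : ((l.length : Int) ≤ 1) := by exact_mod_cast hT
    rw [if_pos h1]
    rw [PySem.List.pyRange_one]
    have h0 : ((l.length : Int) - 1).toNat = 0 := by omega
    rw [h0]
    rfl
  · have h1 : ¬ ((l.length : Int) ≤ 1) := by omega
    rw [if_neg h1]
    rw [pvALoop_eq, pvBLoop_eq, PySem.List.pyRange_one]
    have h0 : ((l.length : Int) - 1).toNat = l.length - 1 := by omega
    rw [h0, List.find?_map, List.find?_map]
    have := pvMain l (by omega)
    simp only [Function.comp_def] at *
    rw [this]
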